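-- pv_equiv track=rewrite | github.com/openstax/research-kg-learning | model/te-pytorch-models/utils/util.py | tag_bioes
-- ===== SOURCE A (Python) =====
-- def tag_bioes(tags, match_index, term_length):
--     """ Updates tags for a text using the BIOES tagging scheme.
--
--     B = beginning of term phrase
--     I = interior of term phrase
--     O = non-term
--     E = end of term phrase
--     S = singleton term
--
--     Parameters
--     ----------
--     tags: list of str
--         List of current BIOES tags for given tokenized text that we will be updating
--     match_index: int
--         Index at which the term was matched in the text
--     term_length: int
--         Number of tokens that compose the term ('cell wall' -> 2)
--
--     Returns
--     -------
--     list of str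
--         Updated list of BIOES tags for the given tokenized text
--
--     Examples
--     --------
--
--     >>> tag_bioes(['O', 'O', 'O', 'O'], 1, 2)
--     ['O', 'B', 'E', 'O']
--
--     >>> tag_bioes(['O', 'O', 'O', 'O'], 0, 1)
--     ['S', 'O', 'O', 'O']
--
--     >>> tag_bioes(['O', 'O', 'O', 'O'], 1, 3)
--     ['O', 'B', 'I', 'E']
--     """
--
--     if term_length == 1:
--         tags[match_index] = "S"
--     else:
--         for i in range(term_length):
--             if i == 0:
--                 tags[match_index + i] = "B"
--             elif i == term_length - 1:
--                 tags[match_index + i] = "E"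
--             else:
--                 tags[match_index + i] = "I"
--     return tags
-- ===== SOURCE B (Python) =====
-- def tag_bioes(tags, match_index, term_length):
--     """Rebuild the tag list positionally: one comprehension over all of tags,
--     computing each position's tag from its offset relative to the matched span."""
--     n = len(tags)
--     start = match_index + n if match_index < 0 else match_index
--
--     def label(off, old):
--         if off < 0 or off >= term_length:
--             return old
--         if term_length == 1:
--             return "S"
--         if off == 0:
--             return "B"
--         if off == term_length - 1:
--             return "E"
--         return "I"
--
--     return [label(j - start, old) for j, old in enumerate(tags)]
-- ===== Notes on version B (the rewrite author's own statement) =====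
-- stated objective: alternative
-- what changed: B rebuilds the whole tag list in a single positional pass (each position's tag is computed from its offset to the matched span, with a Python-style normalised start for a negative match_index) instead of A's in-place indexed writes over the span; B returns a fresh list and does not mutate tags.
-- intended difference: On in-range spans of length >= 2 starting at a negative match_index and crossing index 0 (except the degenerate inputs whose front entries already read I..I,E, where both agree), A's per-index negative wraparound scatters the span's tags to both ends of the list (returns ['E','O','B'] for (['O','O','O'], -1, 2)) while B tags the one contiguous span at the normalised start as far as the list reaches (['O','O','B']), the intended reading of 'tag this span'. — e.g. on tag_bioes(["O", "O", "O"], -1, 2): A returns ["E", "O", "B"], B returns ["O", "O", "B"]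
import Mathlib
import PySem

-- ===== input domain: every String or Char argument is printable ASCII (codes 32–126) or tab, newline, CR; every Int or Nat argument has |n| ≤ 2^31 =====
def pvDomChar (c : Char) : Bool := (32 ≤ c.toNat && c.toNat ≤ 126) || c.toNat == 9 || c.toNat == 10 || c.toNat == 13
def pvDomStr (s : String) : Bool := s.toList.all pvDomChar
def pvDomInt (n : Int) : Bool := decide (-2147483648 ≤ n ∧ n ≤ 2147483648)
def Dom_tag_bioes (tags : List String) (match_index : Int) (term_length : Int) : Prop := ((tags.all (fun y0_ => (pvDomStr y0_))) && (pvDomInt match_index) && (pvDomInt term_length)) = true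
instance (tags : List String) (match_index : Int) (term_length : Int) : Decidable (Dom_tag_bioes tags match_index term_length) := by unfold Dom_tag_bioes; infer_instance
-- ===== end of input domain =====

-- B rebuilds the whole tag list in one positional pass (each position's tag computed from its
-- offset to the matched span) instead of A's in-place writes over the span; same cost, different
-- algorithmic shape.  A mutates `tags` in place and returns it, B returns a fresh list: the
-- equivalence proved here is about the RETURN value only.

-- ===== PORT A =====
def tag_bioes (tags : List String) (match_index : Int) (term_length : Int) : List String :=
  if term_length == 1 then
    PySem.List.pySetD tags match_index "S"
  else
    (PySem.List.pyRange 0 term_length 1).foldl (fun acc i =>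
      if i == 0 then PySem.List.pySetD acc (match_index + i) "B"
      else if i == term_length - 1 then PySem.List.pySetD acc (match_index + i) "E"
      else PySem.List.pySetD acc (match_index + i) "I") tags

-- ===== PORT B =====
def pvLabel (term_length off : Int) (old : String) : String :=
  if off < 0 ∨ term_length ≤ off then old
  else if term_length == 1 then "S"
  else if off == 0 then "B"
  else if off == term_length - 1 then "E"
  else "I"

def tag_bioes_alt (tags : List String) (match_index : Int) (term_length : Int) : List String :=
  let n : Int := PySem.List.len tags
  let start : Int := if match_index < 0 then match_index + n else match_index
  (PySem.List.enumerate tags).map (fun p => pvLabel term_length (p.1 - start) p.2)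

-- ===== PRECONDITION & SPEC =====
-- Pre_ excludes exactly the inputs where Python A raises IndexError: some written position
-- match_index + i (i < term_length, or i = 0 when term_length == 1) out of range.
def Pre_tag_bioes (tags : List String) (match_index : Int) (term_length : Int) : Prop :=
  if term_length = 1 then PySem.Raise.InRange tags.length match_index
  else 0 < term_length →
    PySem.Raise.InRange tags.length match_index ∧
    PySem.Raise.InRange tags.length (match_index + term_length - 1)
instance (tags : List String) (match_index : Int) (term_length : Int) : Decidable (Pre_tag_bioes tags match_index term_length) := by unfold Pre_tag_bioes; infer_instance
def pvWitness_tag_bioes : List String × Int × Int := (["O", "O", "O", "O"], 1, 2)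

-- On in-range spans (term_length >= 2) that start at a negative match_index and cross index 0,
-- A's per-index negative wraparound scatters the span's tags to both ends of the list
-- (e.g. E at the front, B at the back), while B tags the one contiguous span starting at the
-- normalised index as far as the list reaches -- the intended reading of 'tag this span';
-- D_ leaves out only the degenerate wraparound inputs whose front entries already read I..I,E,
-- where the two results coincide.
def D_tag_bioes (tags : List String) (match_index : Int) (term_length : Int) : Prop :=
  2 ≤ term_length ∧ match_index < 0 ∧ 0 < match_index + term_length ∧
    -(tags.length : Int) ≤ match_index ∧ match_index + term_length - 1 < (tags.length : Int) ∧
    ¬(term_length ≤ (tags.length : Int) ∧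
        (∀ j ∈ List.range (match_index + term_length - 1).toNat, tags.getD j "" = "I") ∧
        tags.getD (match_index + term_length - 1).toNat "" = "E")
instance (tags : List String) (match_index : Int) (term_length : Int) : Decidable (D_tag_bioes tags match_index term_length) := by unfold D_tag_bioes; infer_instance

def Spec_tag_bioes (tags : List String) (match_index : Int) (term_length : Int) (out : List String) : Prop := ¬ D_tag_bioes tags match_index term_length → out = tag_bioes_alt tags match_index term_length
instance (tags : List String) (match_index : Int) (term_length : Int) (out : List String) : Decidable (Spec_tag_bioes tags match_index term_length out) := by unfold Spec_tag_bioes; infer_instance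

def pvDiffWitness_tag_bioes : List String × Int × Int := (["O", "O", "O"], -1, 2)
def pvDiffWitnessOut_tag_bioes : (List String) × (List String) := (["E", "O", "B"], ["O", "O", "B"])

-- ===== CLAIM (what is proved, stated in full; the proofs are below) =====
def Claim_unchanged_tag_bioes : Prop := ∀ (tags : List String) (match_index : Int) (term_length : Int), Dom_tag_bioes tags match_index term_length → Pre_tag_bioes tags match_index term_length → Spec_tag_bioes tags match_index term_length (tag_bioes tags match_index term_length)
def Claim_changed_tag_bioes : Prop := Dom_tag_bioes (pvDiffWitness_tag_bioes.1) (pvDiffWitness_tag_bioes.2.1) (pvDiffWitness_tag_bioes.2.2) ∧ Pre_tag_bioes (pvDiffWitness_tag_bioes.1) (pvDiffWitness_tag_bioes.2.1) (pvDiffWitness_tag_bioes.2.2) ∧ D_tag_bioes (pvDiffWitness_tag_bioes.1) (pvDiffWitness_tag_bioes.2.1) (pvDiffWitness_tag_bioes.2.2) ∧ tag_bioes (pvDiffWitness_tag_bioes.1) (pvDiffWitness_tag_bioes.2.1) (pvDiffWitness_tag_bioes.2.2) = pvDiffWitnessOut_tag_bioes.1 ∧ tag_bioes_alt (pvDiffWitness_tag_bioes.1)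 (pvDiffWitness_tag_bioes.2.1) (pvDiffWitness_tag_bioes.2.2) = pvDiffWitnessOut_tag_bioes.2 ∧ pvDiffWitnessOut_tag_bioes.1 ≠ pvDiffWitnessOut_tag_bioes.2
def Claim_exact_tag_bioes : Prop := ∀ (tags : List String) (match_index : Int) (term_length : Int), Dom_tag_bioes tags match_index term_length → Pre_tag_bioes tags match_index term_length → D_tag_bioes tags match_index term_length → tag_bioes tags match_index term_length ≠ tag_bioes_alt tags match_index term_length

-- ===== LEMMAS AND PROOFS =====

-- pySetD with an in-range negative index sets at index + length.
theorem pySetD_neg_idx (xs : List String) (i : Int) (v : String)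
    (h1 : -(xs.length : Int) ≤ i) (h2 : i < 0) :
    PySem.List.pySetD xs i v = xs.set (i + xs.length).toNat v := by
  unfold PySem.List.pySetD PySem.List.pySet? PySem.List.pyIdx?
  split_ifs with hA hB
  · omega
  · omega
  · simp only [Option.getD_some, Option.map_some]
    congr 1
    omega

-- A fold of plain `set`s at positions s, s+1, …, s+m-1 preserves length …
theorem foldl_set_length (xs : List String) (f : Nat → String) (s : Nat) (m : Nat) :
    ((List.range m).foldl (fun acc k => acc.set (s + k) (f k)) xs).length = xs.length := by
  induction m with
  | zero => simp
  | succ m ih => rw [List.range_succ, List.foldl_append]; simp [ih]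

-- … and its element at j is f (j - s) inside the written window, the original outside.
theorem foldl_set_getElem? (xs : List String) (f : Nat → String) (s m j : Nat)
    (hj : j < xs.length) :
    ((List.range m).foldl (fun acc k => acc.set (s + k) (f k)) xs)[j]?
      = some (if s ≤ j ∧ j < s + m then f (j - s) else xs[j]) := by
  induction m with
  | zero =>
      simp only [List.range_zero, List.foldl_nil]
      rw [if_neg (by omega), List.getElem?_eq_getElem hj]
  | succ m ih =>
      rw [List.range_succ, List.foldl_append]
      simp only [List.foldl_cons, List.foldl_nil]
      rw [List.getElem?_set, ih]
      by_cases hje : s + m = j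
      · rw [if_pos hje, if_pos (by rw [foldl_set_length]; omega), if_pos (by omega)]
        congr 2
        omega
      · rw [if_neg hje]
        split_ifs <;> first | rfl | omega

-- Writing at the in-range negative indices mi, mi+1, …, mi+m-1 (all < 0) is writing at the
-- nonnegative indices (mi+len)+k.
theorem foldl_pySetD_neg (g : Nat → String) (mi : Int) (m : Nat) (xs : List String)
    (hneg : mi + m ≤ 0) (hlo : -(xs.length : Int) ≤ mi) :
    (List.range m).foldl (fun acc (k : Nat) => PySem.List.pySetD acc (mi + (k : Int)) (g k)) xs
      = (List.range m).foldl (fun acc (k : Nat) => acc.set ((mi + xs.length).toNat + k) (g k)) xs := by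
  induction m with
  | zero => simp
  | succ m ih =>
      rw [List.range_succ, List.foldl_append, List.foldl_append]
      simp only [List.foldl_cons, List.foldl_nil]
      rw [ih (by push_cast at hneg ⊢; omega)]
      rw [pySetD_neg_idx _ _ _ (by rw [foldl_set_length]; push_cast at hneg ⊢; omega)
            (by push_cast at hneg ⊢; omega)]
      congr 1
      rw [foldl_set_length]
      push_cast at hneg ⊢
      omega

-- Writing at the nonnegative indices mi+k is writing at mi.toNat + k.
theorem foldl_pySetD_nonneg (g : Nat → String) (mi : Int) (m : Nat) (xs : List String)
    (hmi : 0 ≤ mi) :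
    (List.range m).foldl (fun acc (k : Nat) => PySem.List.pySetD acc (mi + (k : Int)) (g k)) xs
      = (List.range m).foldl (fun acc (k : Nat) => acc.set (mi.toNat + k) (g k)) xs := by
  induction m with
  | zero => simp
  | succ m ih =>
      rw [List.range_succ, List.foldl_append, List.foldl_append]
      simp only [List.foldl_cons, List.foldl_nil]
      rw [ih, PySem.List.pySetD_of_nonneg _ _ (show (0 : Int) ≤ mi + (m : Int) by omega)]
      congr 1
      omega

-- B's element at index j, for any j.
theorem alt_getElem? (tags : List String) (mi tl : Int) (j : Nat) :
    (tag_bioes_alt tags mi tl)[j]?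
      = (tags[j]?).map (fun old =>
          pvLabel tl ((j : Int) - (if mi < 0 then mi + tags.length else mi)) old) := by
  simp [tag_bioes_alt, PySem.List.getElem?_enumerate]
  cases tags[j]? <;> rfl

-- B equals the original list when the span is empty.
theorem alt_empty (tags : List String) (mi tl : Int) (htl : tl ≤ 0) :
    tags = tag_bioes_alt tags mi tl := by
  apply List.ext_getElem?
  intro j
  rw [alt_getElem? tags mi tl j]
  by_cases hj : j < tags.length
  · rw [List.getElem?_eq_getElem hj]
    simp only [Option.map_some, Option.some_inj]
    unfold pvLabel
    rw [if_pos (by omega)]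
  · rw [List.getElem?_eq_none (by omega)]
    rfl

-- B equals a single `set` of "S" when term_length = 1.
theorem alt_single (tags : List String) (mi tl : Int) (htl : tl = 1) (sN : Nat)
    (hsN : (sN : Int) = (if mi < 0 then mi + tags.length else mi)) (hlt : sN < tags.length) :
    tags.set sN "S" = tag_bioes_alt tags mi tl := by
  subst htl
  apply List.ext_getElem?
  intro j
  rw [List.getElem?_set, alt_getElem? tags mi 1 j, ← hsN]
  clear hsN
  by_cases hj : j < tags.length
  · rw [List.getElem?_eq_getElem hj]
    simp only [Option.map_some]
    unfold pvLabel
    simp only [beq_self_eq_true, if_true]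
    by_cases hje : sN = j
    · rw [if_pos hje, if_pos (by omega),
          if_neg (show ¬((j : Int) - (sN : Int) < 0 ∨ (1 : Int) ≤ (j : Int) - (sN : Int)) by omega)]
    · rw [if_neg hje,
          if_pos (show ((j : Int) - (sN : Int) < 0 ∨ (1 : Int) ≤ (j : Int) - (sN : Int)) by omega)]
  · rw [List.getElem?_eq_none (by omega), if_neg (by omega)]
    rfl

-- B equals the B/I…I/E window write when term_length ≥ 2 and the window [sN, sN+tl) is in range.
theorem alt_window (tags : List String) (mi tl : Int) (htl : 2 ≤ tl) (sN : Nat)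
    (hsN : (sN : Int) = (if mi < 0 then mi + tags.length else mi))
    (hwin : (sN : Int) + tl ≤ tags.length) :
    (List.range tl.toNat).foldl
        (fun acc (k : Nat) => acc.set (sN + k)
          (if (k : Int) = 0 then "B" else if (k : Int) = tl - 1 then "E" else "I")) tags
      = tag_bioes_alt tags mi tl := by
  obtain ⟨m, rfl⟩ : ∃ m : Nat, tl = (m : Int) := ⟨tl.toNat, by omega⟩
  simp only [Int.toNat_natCast]
  apply List.ext_getElem?
  intro j
  rw [alt_getElem? tags mi (m : Int) j, ← hsN]
  clear hsN
  by_cases hj : j < tags.length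
  · rw [foldl_set_getElem? tags _ sN m j hj, List.getElem?_eq_getElem hj]
    simp only [Option.map_some, Option.some_inj]
    unfold pvLabel
    simp only [beq_iff_eq]
    by_cases hw : sN ≤ j ∧ j < sN + m
    · have hoff' : ((j - sN : Nat) : Int) = (j : Int) - (sN : Int) := by omega
      rw [if_pos hw,
          if_neg (show ¬((j : Int) - (sN : Int) < 0 ∨ (m : Int) ≤ (j : Int) - (sN : Int)) by omega),
          if_neg (show ¬((m : Int) = 1) by omega)]
      split_ifs <;> first | rfl | omega
    · rw [if_neg hw,
          if_pos (show ((j : Int) - (sN : Int) < 0 ∨ (m : Int) ≤ (j : Int) - (sN : Int)) by omega)]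
  · rw [List.getElem?_eq_none (by rw [foldl_set_length]; omega),
        List.getElem?_eq_none (by omega)]
    rfl

-- A's loop body, with the branch on i pulled into the written label.
theorem bodyA_eq (mi tl : Int) :
    (fun (acc : List String) (i : Int) =>
      if i == 0 then PySem.List.pySetD acc (mi + i) "B"
      else if i == tl - 1 then PySem.List.pySetD acc (mi + i) "E"
      else PySem.List.pySetD acc (mi + i) "I")
    = fun (acc : List String) (i : Int) => PySem.List.pySetD acc (mi + i)
        (if i = 0 then "B" else if i = tl - 1 then "E" else "I") := by
  funext acc i
  simp only [beq_iff_eq]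
  split_ifs <;> rfl

-- A's result on a wraparound span (mi < 0 < mi+tl, in range), element by element: the
-- nonnegative-index writes land at the front (I..I,E on [0, mi+tl)), the negative-index
-- writes at the back (B,I..I on [mi+len, len)).
theorem wrapA_getElem? (tags : List String) (mi tl : Int)
    (hmi : mi < 0) (hcross : 0 < mi + tl) (htl : 2 ≤ tl)
    (hlo : -(tags.length : Int) ≤ mi) (_hhi : mi + tl - 1 < (tags.length : Int)) (j : Nat) :
    (tag_bioes tags mi tl)[j]? =
      if j < tags.length then
        some (if (j : Int) < mi + tl then
                (if (j : Int) = mi + tl - 1 then "E" else "I")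
              else if (mi + tags.length : Int) ≤ (j : Int) then
                (if (j : Int) = mi + tags.length then "B" else "I")
              else tags.getD j "")
      else none := by
  unfold tag_bioes
  rw [if_neg (show ¬ (tl == 1) = true by simp; omega)]
  rw [bodyA_eq, PySem.List.pyRange_one, List.foldl_map]
  simp only [Int.sub_zero, zero_add]
  rw [show tl.toNat = (-mi).toNat + (mi + tl).toNat by omega]
  rw [List.range_add, List.foldl_append]
  rw [foldl_pySetD_neg
      (fun k : Nat => if (k : Int) = 0 then "B" else if (k : Int) = tl - 1 then "E" else "I")
      mi (-mi).toNat tags (by omega) hlo]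
  rw [List.foldl_map]
  have hbody2 : (fun (acc : List String) (x : Nat) =>
        PySem.List.pySetD acc (mi + (((-mi).toNat + x : Nat) : Int))
          (if (((-mi).toNat + x : Nat) : Int) = 0 then "B"
           else if (((-mi).toNat + x : Nat) : Int) = tl - 1 then "E" else "I"))
      = fun (acc : List String) (x : Nat) => acc.set (0 + x)
          (if (((-mi).toNat + x : Nat) : Int) = 0 then "B"
           else if (((-mi).toNat + x : Nat) : Int) = tl - 1 then "E" else "I") := by
    funext acc x
    rw [PySem.List.pySetD_of_nonneg _ _ (by omega)]
    congr 1
    omega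
  rw [hbody2]
  have hlen1 : ((List.range (-mi).toNat).foldl
      (fun acc k => acc.set ((mi + (tags.length : Int)).toNat + k)
        (if (k : Int) = 0 then "B" else if (k : Int) = tl - 1 then "E" else "I")) tags).length
      = tags.length := foldl_set_length _ _ _ _
  by_cases hj : j < tags.length
  · rw [if_pos hj]
    rw [foldl_set_getElem? _ _ 0 (mi + tl).toNat j (by rw [hlen1]; exact hj)]
    have h2 := foldl_set_getElem? tags
      (fun k : Nat => if (k : Int) = 0 then "B" else if (k : Int) = tl - 1 then "E" else "I")
      (mi + (tags.length : Int)).toNat (-mi).toNat j hj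
    have h2' : ((List.range (-mi).toNat).foldl
        (fun acc k => acc.set ((mi + (tags.length : Int)).toNat + k)
          (if (k : Int) = 0 then "B" else if (k : Int) = tl - 1 then "E" else "I")) tags)[j]'(by rw [hlen1]; exact hj)
        = (if (mi + (tags.length : Int)).toNat ≤ j ∧ j < (mi + (tags.length : Int)).toNat + (-mi).toNat
            then (if ((j - (mi + (tags.length : Int)).toNat : Nat) : Int) = 0 then "B"
                  else if ((j - (mi + (tags.length : Int)).toNat : Nat) : Int) = tl - 1 then "E" else "I")
            else tags[j]) := by
      rw [List.getElem?_eq_getElem (by rw [hlen1]; exact hj)] at h2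
      exact Option.some.inj h2
    rw [h2']
    congr 1
    split_ifs <;>
      first
        | rfl
        | omega
        | exact (List.getD_eq_getElem tags "" hj).symm
  · rw [if_neg hj, List.getElem?_eq_none (by rw [foldl_set_length, hlen1]; omega)]

-- On the degenerate wraparound inputs whose front entries already read I..I,E, A's scattered
-- writes reproduce the input's front and B's window reproduces A's back: the results coincide.
theorem wrap_agree (tags : List String) (mi tl : Int)
    (hmi : mi < 0) (hcross : 0 < mi + tl) (htl : 2 ≤ tl)
    (hlo : -(tags.length : Int) ≤ mi) (hhi : mi + tl - 1 < (tags.length : Int))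
    (htln : tl ≤ (tags.length : Int))
    (hpref : ∀ j ∈ List.range (mi + tl - 1).toNat, tags.getD j "" = "I")
    (hE : tags.getD (mi + tl - 1).toNat "" = "E") :
    tag_bioes tags mi tl = tag_bioes_alt tags mi tl := by
  apply List.ext_getElem?
  intro j
  rw [wrapA_getElem? tags mi tl hmi hcross htl hlo hhi j, alt_getElem? tags mi tl j]
  by_cases hj : j < tags.length
  · rw [if_pos hj, List.getElem?_eq_getElem hj, if_pos hmi]
    simp only [Option.map_some, Option.some_inj]
    unfold pvLabel
    simp only [beq_iff_eq]
    by_cases hfrontj : (j : Int) < mi + tl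
    · rw [if_pos hfrontj,
          if_pos (show (j : Int) - (mi + (tags.length : Int)) < 0 ∨ tl ≤ (j : Int) - (mi + (tags.length : Int)) by omega)]
      by_cases hEj : (j : Int) = mi + tl - 1
      · rw [if_pos hEj, ← List.getD_eq_getElem tags "" hj,
            show j = (mi + tl - 1).toNat by omega, hE]
      · rw [if_neg hEj, ← List.getD_eq_getElem tags "" hj]
        exact (hpref j (by rw [List.mem_range]; omega)).symm
    · rw [if_neg hfrontj]
      by_cases hbackj : (mi + (tags.length : Int)) ≤ (j : Int)
      · rw [if_pos hbackj,
            if_neg (show ¬((j : Int) - (mi + (tags.length : Int)) < 0 ∨ tl ≤ (j : Int) - (mi + (tags.length : Int))) by omega),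
            if_neg (show ¬(tl = 1) by omega)]
        by_cases hBj : (j : Int) = mi + (tags.length : Int)
        · rw [if_pos hBj,
              if_pos (show (j : Int) - (mi + (tags.length : Int)) = 0 by omega)]
        · rw [if_neg hBj,
              if_neg (show ¬((j : Int) - (mi + (tags.length : Int)) = 0) by omega),
              if_neg (show ¬((j : Int) - (mi + (tags.length : Int)) = tl - 1) by omega)]
      · rw [if_neg hbackj,
            if_pos (show (j : Int) - (mi + (tags.length : Int)) < 0 ∨ tl ≤ (j : Int) - (mi + (tags.length : Int)) by omega),
            List.getD_eq_getElem tags "" hj]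
  · rw [if_neg hj, List.getElem?_eq_none (by omega)]
    rfl

-- ===== VERDICT (by name: the statement is the Claim_ definition above) =====
theorem tag_bioes_spec : Claim_unchanged_tag_bioes := by
  intro tags mi tl _ hpre hnd
  unfold Pre_tag_bioes at hpre
  unfold D_tag_bioes at hnd
  show tag_bioes tags mi tl = tag_bioes_alt tags mi tl
  by_cases h1 : tl = 1
  · -- singleton span
    rw [if_pos h1] at hpre
    unfold PySem.Raise.InRange at hpre
    unfold tag_bioes
    rw [if_pos (show (tl == 1) = true by simp [h1])]
    by_cases hmi : 0 ≤ mi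
    · rw [PySem.List.pySetD_of_nonneg _ _ hmi]
      exact alt_single tags mi tl h1 mi.toNat (by rw [if_neg (by omega)]; omega) (by omega)
    · rw [pySetD_neg_idx _ _ _ (by omega) (by omega)]
      exact alt_single tags mi tl h1 (mi + (tags.length : Int)).toNat
        (by rw [if_pos (by omega)]; omega) (by omega)
  · rw [if_neg h1] at hpre
    by_cases h0 : tl ≤ 0
    · -- empty span: A's loop body never runs, B writes no label
      unfold tag_bioes
      rw [if_neg (show ¬ (tl == 1) = true by simp [h1])]
      rw [PySem.List.pyRange_one_eq_nil (by omega)]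
      simp only [List.foldl_nil]
      exact alt_empty tags mi tl h0
    · -- tl ≥ 2
      obtain ⟨hin1, hin2⟩ := hpre (by omega)
      unfold PySem.Raise.InRange at hin1 hin2
      have htl2 : 2 ≤ tl := by omega
      by_cases hmi : 0 ≤ mi
      · unfold tag_bioes
        rw [if_neg (show ¬ (tl == 1) = true by simp [h1])]
        rw [bodyA_eq, PySem.List.pyRange_one, List.foldl_map]
        simp only [Int.sub_zero, zero_add]
        rw [foldl_pySetD_nonneg
            (fun k : Nat => if (k : Int) = 0 then "B" else if (k : Int) = tl - 1 then "E" else "I")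
            mi tl.toNat tags hmi]
        exact alt_window tags mi tl htl2 mi.toNat (by rw [if_neg (by omega)]; omega) (by omega)
      · by_cases hle : mi + tl ≤ 0
        · unfold tag_bioes
          rw [if_neg (show ¬ (tl == 1) = true by simp [h1])]
          rw [bodyA_eq, PySem.List.pyRange_one, List.foldl_map]
          simp only [Int.sub_zero, zero_add]
          rw [foldl_pySetD_neg
              (fun k : Nat => if (k : Int) = 0 then "B" else if (k : Int) = tl - 1 then "E" else "I")
              mi tl.toNat tags (by omega) (by omega)]
          exact alt_window tags mi tl htl2 (mi + (tags.length : Int)).toNat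
            (by rw [if_pos (by omega)]; omega) (by omega)
        · -- wraparound span: outside D_ only when the degenerate agree pattern holds
          have hag : tl ≤ (tags.length : Int) ∧
              (∀ j ∈ List.range (mi + tl - 1).toNat, tags.getD j "" = "I") ∧
              tags.getD (mi + tl - 1).toNat "" = "E" := by
            by_contra hng
            exact hnd ⟨htl2, by omega, by omega, by omega, by omega, hng⟩
          exact wrap_agree tags mi tl (by omega) (by omega) htl2 (by omega) (by omega)
            hag.1 hag.2.1 hag.2.2

theorem tag_bioes_changed : Claim_changed_tag_bioes := by
  unfold Claim_changed_tag_bioes; decide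

theorem tag_bioes_tight : Claim_exact_tag_bioes := by
  intro tags mi tl _ _ hD heq
  obtain ⟨htl, hmi, hcross, hlo, hhi, hnag⟩ := hD
  by_cases htln : tl ≤ (tags.length : Int)
  · by_cases hE : tags.getD (mi + tl - 1).toNat "" = "E"
    · -- some front entry below mi+tl-1 is not "I"
      have hpref : ¬ ∀ j ∈ List.range (mi + tl - 1).toNat, tags.getD j "" = "I" := by
        intro hp
        exact hnag ⟨htln, hp, hE⟩
      rw [not_forall] at hpref
      obtain ⟨j, hj⟩ := hpref
      rw [Classical.not_imp] at hj
      obtain ⟨hjmem, hjne⟩ := hj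
      rw [List.mem_range] at hjmem
      have hjlt : j < tags.length := by omega
      have := congrArg (fun l => l[j]?) heq
      simp only at this
      rw [wrapA_getElem? tags mi tl hmi hcross htl hlo hhi j,
          alt_getElem? tags mi tl j, if_pos hjlt, List.getElem?_eq_getElem hjlt,
          if_pos hmi] at this
      simp only [Option.map_some, Option.some_inj] at this
      rw [if_pos (show (j : Int) < mi + tl by omega),
          if_neg (show ¬ (j : Int) = mi + tl - 1 by omega)] at this
      unfold pvLabel at this
      simp only [beq_iff_eq] at this
      rw [if_pos (show (j : Int) - (mi + (tags.length : Int)) < 0 ∨ tl ≤ (j : Int) - (mi + (tags.length : Int)) by omega)] at this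
      rw [← List.getD_eq_getElem tags "" hjlt] at this
      exact hjne this.symm
    · -- front entry at mi+tl-1 is not "E"
      have hjlt : (mi + tl - 1).toNat < tags.length := by omega
      have := congrArg (fun l => l[(mi + tl - 1).toNat]?) heq
      simp only at this
      rw [wrapA_getElem? tags mi tl hmi hcross htl hlo hhi _,
          alt_getElem? tags mi tl _, if_pos hjlt, List.getElem?_eq_getElem hjlt,
          if_pos hmi] at this
      simp only [Option.map_some, Option.some_inj] at this
      rw [if_pos (show (((mi + tl - 1).toNat : Nat) : Int) < mi + tl by omega),
          if_pos (show (((mi + tl - 1).toNat : Nat) : Int) = mi + tl - 1 by omega)] at this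
      unfold pvLabel at this
      simp only [beq_iff_eq] at this
      rw [if_pos (show (((mi + tl - 1).toNat : Nat) : Int) - (mi + (tags.length : Int)) < 0 ∨ tl ≤ (((mi + tl - 1).toNat : Nat) : Int) - (mi + (tags.length : Int)) by omega)] at this
      rw [← List.getD_eq_getElem tags "" hjlt] at this
      exact hE this.symm
  · -- span longer than the list: A and B disagree at the normalised start (B vs I/E)
    have hjlt : (mi + (tags.length : Int)).toNat < tags.length := by omega
    have := congrArg (fun l => l[(mi + (tags.length : Int)).toNat]?) heq
    simp only at this
    rw [wrapA_getElem? tags mi tl hmi hcross htl hlo hhi _,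
        alt_getElem? tags mi tl _, if_pos hjlt, List.getElem?_eq_getElem hjlt,
        if_pos hmi] at this
    simp only [Option.map_some, Option.some_inj] at this
    rw [if_pos (show (((mi + (tags.length : Int)).toNat : Nat) : Int) < mi + tl by omega)] at this
    unfold pvLabel at this
    simp only [beq_iff_eq] at this
    rw [if_neg (show ¬((((mi + (tags.length : Int)).toNat : Nat) : Int) - (mi + (tags.length : Int)) < 0 ∨ tl ≤ (((mi + (tags.length : Int)).toNat : Nat) : Int) - (mi + (tags.length : Int))) by omega)] at this
    rw [if_neg (show ¬ tl = 1 by omega)] at this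
    rw [if_pos (show (((mi + (tags.length : Int)).toNat : Nat) : Int) - (mi + (tags.length : Int)) = 0 by omega)] at this
    revert this
    split_ifs <;> decide
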